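-- pv_equiv track=rewrite | github.com/2021-Dev-Study/Algorithm | 프로그래머스/신고 결과 받기/kcho32.py | solution
-- ===== SOURCE A (Python) =====
-- from collections import Counter
--
-- def solution(id_list, report, k):
--     # 중복 신고 제거 과정
--     report = set(report)
--     # reporting: 신고한 유저
--     # reported: 신고 당한 유저 (+ Counter)
--     reporting_user = {reporting: [] for reporting in id_list}
--
--     for i in report:
--         reporting, reported = i.split()
--         reporting_user[reporting].append(reported)
--
--     reported_user = Counter([user.split()[1] for user in report])
--
--     answer = [0 for i in range(len(id_list))]
--     for idx, user in enumerate(id_list):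
--         for reported in reporting_user[user]:
--             if reported_user[reported] >= k:
--                 answer[idx] += 1
--
--     return answer
-- ===== SOURCE B (Python) =====
-- def solution(id_list, report, k):
--     # Inverse grouping: bucket the deduplicated reports by the REPORTED user
--     # (reported -> list of reporters), then credit every reporter inside each
--     # bucket whose size reaches the threshold k.
--     targets = {}
--     for r in set(report):
--         reporter, reported = r.split()
--         targets.setdefault(reported, []).append(reporter)
--     tally = dict.fromkeys(id_list, 0)
--     for reporters in targets.values():
--         if len(reporters) >= k:
--             for rep in reporters:
--                 tally[rep] += 1
--     return [tally[u] for u in id_list]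
-- ===== Notes on version B (the rewrite author's own statement) =====
-- stated objective: alternative
-- what changed: Inverts A's grouping: instead of building reporter->reported adjacency lists plus a Counter and testing each report's target count, B buckets the deduplicated reports by the reported user and, per bucket whose size reaches k, credits every reporter in it into a tally keyed by id_list.
import Mathlib
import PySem

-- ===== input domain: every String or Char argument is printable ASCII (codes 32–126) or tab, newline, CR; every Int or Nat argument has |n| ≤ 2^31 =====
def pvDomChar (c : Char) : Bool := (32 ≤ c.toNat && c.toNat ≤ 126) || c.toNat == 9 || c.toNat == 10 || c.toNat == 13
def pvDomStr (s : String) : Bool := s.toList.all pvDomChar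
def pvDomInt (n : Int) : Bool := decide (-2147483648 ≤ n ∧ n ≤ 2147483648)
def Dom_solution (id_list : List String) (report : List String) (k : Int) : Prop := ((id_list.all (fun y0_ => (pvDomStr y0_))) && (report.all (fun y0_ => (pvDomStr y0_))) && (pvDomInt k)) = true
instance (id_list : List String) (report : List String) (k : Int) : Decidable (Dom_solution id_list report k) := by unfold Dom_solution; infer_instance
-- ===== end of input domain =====

-- B inverts A's grouping: it buckets deduped reports by the REPORTED user and credits every
-- reporter of each bucket of size ≥ k (alternative decomposition, same cost).

-- ===== PORT A =====
def solution (id_list : List String) (report : List String) (k : Int) : List Int :=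
  let rset : PySem.Set String := PySem.Set.ofList report
  let reporting_user : PySem.Dict String (List String) :=
    id_list.foldl (fun d u => d.insert u []) PySem.Dict.empty
  -- for i in report: reporting, reported = i.split(); reporting_user[reporting].append(reported)
  -- (Python raises ValueError/KeyError when i.split() is not a two-word pair with a reporter from id_list;
  --  Pre_solution excludes exactly those inputs, Dict.modify merely totalizes the step)
  let reporting_user :=
    rset.foldl (fun d i =>
      let ws := PySem.Str.split₀ i
      d.modify (ws.getD 0 "") [] (fun l => l ++ [ws.getD 1 ""])) reporting_user
  let reported_user : PySem.Dict String Int :=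
    PySem.Dict.counter (rset.map (fun u => (PySem.Str.split₀ u).getD 1 ""))
  let answer : List Int := (List.range id_list.length).map (fun _ => 0)
  let answer :=
    (PySem.List.enumerate id_list).foldl (fun ans p =>
      (reporting_user.getD p.2 []).foldl (fun a r =>
        if reported_user.getD r 0 ≥ k then
          PySem.List.pySetD a p.1 (PySem.List.pyGetD a p.1 0 + 1)
        else a) ans) answer
  answer

-- ===== PORT B =====
def solution_alt (id_list : List String) (report : List String) (k : Int) : List Int :=
  -- targets: reported user -> list of reporters, over the deduplicated reports
  let targets : PySem.Dict String (List String) :=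
    (PySem.Set.ofList report).foldl (fun d r =>
      let ws := PySem.Str.split₀ r
      d.modify (ws.getD 1 "") [] (fun l => l ++ [ws.getD 0 ""])) PySem.Dict.empty
  let tally : PySem.Dict String Int :=
    id_list.foldl (fun d u => d.insert u 0) PySem.Dict.empty
  -- tally[rep] += 1 raises KeyError for a reporter outside id_list; Pre_solution excludes that,
  -- Dict.modify merely totalizes the step
  let tally :=
    targets.values.foldl (fun d reporters =>
      if (reporters.length : Int) ≥ k then
        reporters.foldl (fun d rep => d.modify rep 0 (· + 1)) d
      else d) tally
  id_list.map (fun u => tally.getD u 0)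

-- ===== PRECONDITION & SPEC =====
-- Exactly the inputs on which Python A returns: every report splits into exactly two words
-- and its reporter occurs in id_list (otherwise A raises ValueError/KeyError/IndexError).
def Pre_solution (id_list : List String) (report : List String) (k : Int) : Prop :=
  ∀ r ∈ report, (PySem.Str.split₀ r).length = 2 ∧ (PySem.Str.split₀ r).getD 0 "" ∈ id_list
instance (id_list : List String) (report : List String) (k : Int) : Decidable (Pre_solution id_list report k) := by unfold Pre_solution; infer_instance

def pvWitness_solution : List String × List String × Int :=
  (["muzi", "frodo", "apeach"], ["muzi frodo", "apeach frodo", "muzi frodo"], 2)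

def Spec_solution (id_list : List String) (report : List String) (k : Int) (out : List Int) : Prop := out = solution_alt id_list report k
instance (id_list : List String) (report : List String) (k : Int) (out : List Int) : Decidable (Spec_solution id_list report k out) := by unfold Spec_solution; infer_instance

-- ===== CLAIM (what is proved, stated in full; the proofs are below) =====
def Claim_equal_solution : Prop := ∀ (id_list : List String) (report : List String) (k : Int), Dom_solution id_list report k → Pre_solution id_list report k → Spec_solution id_list report k (solution id_list report k)

-- ===== LEMMAS AND PROOFS =====

-- abbreviations for the two words of a report (proof-side only)
def w0 (r : String) : String := (PySem.Str.split₀ r).getD 0 ""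
def w1 (r : String) : String := (PySem.Str.split₀ r).getD 1 ""

-- A's outer loop, abstracted over the adjacency map and the ban predicate (proof-side helper)
def loopA (Adj : String → List String) (p : String → Prop) [DecidablePred p]
    (xs : List String) (s : Int) (ans : List Int) : List Int :=
  (PySem.List.enumerate xs s).foldl
    (fun ans pr => (Adj pr.2).foldl
      (fun a r => if p r then PySem.List.pySetD a pr.1 (PySem.List.pyGetD a pr.1 0 + 1) else a) ans) ans

theorem getD_foldl_insert_const {v : Type} (l : List String) (c : v) (u : String) :
    ∀ (d : PySem.Dict String v), (∀ x, d.getD x c = c) →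
      (l.foldl (fun d x => d.insert x c) d).getD u c = c := by
  induction l with
  | nil => intro d h; exact h u
  | cons x xs ih =>
    intro d h
    simp only [List.foldl_cons]
    refine ih _ (fun y => ?_)
    rw [PySem.Dict.getD_insert]
    split
    · rfl
    · exact h y

theorem getD_set (xs : List Int) (s i : Nat) (v : Int) :
    (xs.set s v).getD i 0 = if i = s ∧ s < xs.length then v else xs.getD i 0 := by
  simp only [List.getD, List.getElem?_set]
  split_ifs with h1 h2 h3 <;> simp_all

theorem inner_fold (p : String → Prop) [DecidablePred p] :
    ∀ (lst : List String) (s : Nat) (ans : List Int),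
      (lst.foldl (fun a r =>
          if p r then PySem.List.pySetD a (s : Int) (PySem.List.pyGetD a (s : Int) 0 + 1) else a) ans)
        = ans.set s (ans.getD s 0 + (lst.countP (fun r => decide (p r)) : Int)) := by
  intro lst
  induction lst with
  | nil =>
    intro s ans
    simp only [List.foldl_nil, List.countP_nil, Nat.cast_zero, add_zero]
    rcases Nat.lt_or_ge s ans.length with h | h
    · rw [List.getD_eq_getElem _ _ h]
      exact (List.set_getElem_self h).symm
    · rw [List.set_eq_of_length_le h]
  | cons r lst ih =>
    intro s ans
    simp only [List.foldl_cons, List.countP_cons]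
    by_cases hp : p r
    · rw [if_pos hp, PySem.List.pySetD_natCast, PySem.List.pyGetD_natCast, ih]
      rw [List.set_set, getD_set]
      rcases Nat.lt_or_ge s ans.length with h | h
      · rw [if_pos (show s = s ∧ s < ans.length from ⟨rfl, h⟩)]
        simp only [hp, decide_true]
        congr 1
        push_cast
        ring
      · rw [if_neg (show ¬(s = s ∧ s < ans.length) by omega)]
        rw [List.set_eq_of_length_le h, List.set_eq_of_length_le h]
    · rw [if_neg hp, ih]
      simp only [hp, decide_false, Bool.false_eq_true, if_false, Nat.add_zero]

theorem loopA_cons (Adj : String → List String) (p : String → Prop) [DecidablePred p]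
    (x : String) (xs : List String) (s : Int) (ans : List Int) :
    loopA Adj p (x :: xs) s ans
      = loopA Adj p xs (s + 1)
          ((Adj x).foldl
            (fun a r => if p r then PySem.List.pySetD a s (PySem.List.pyGetD a s 0 + 1) else a) ans) := by
  simp [loopA, PySem.List.enumerate_cons]

theorem loopA_spec (Adj : String → List String) (p : String → Prop) [DecidablePred p] :
    ∀ (xs : List String) (s : Nat) (ans : List Int), s + xs.length ≤ ans.length →
      (loopA Adj p xs (s : Int) ans).length = ans.length ∧
      ∀ i : Nat, (loopA Adj p xs (s : Int) ans).getD i 0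
        = if s ≤ i ∧ i < s + xs.length
            then ans.getD i 0 + ((Adj (xs.getD (i - s) "")).countP (fun r => decide (p r)) : Int)
            else ans.getD i 0 := by
  intro xs
  induction xs with
  | nil =>
    intro s ans _
    refine ⟨by simp [loopA], fun i => ?_⟩
    rw [if_neg (by simp)]
    simp [loopA]
  | cons x xs ih =>
    intro s ans h
    simp only [List.length_cons] at h
    rw [loopA_cons]
    rw [inner_fold p (Adj x) s ans]
    have hc : ((s : Int) + 1) = ((s + 1 : Nat) : Int) := by push_cast; ring
    set ans1 := ans.set s (ans.getD s 0 + ((Adj x).countP (fun r => decide (p r)) : Int)) with hans1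
    have hlen1 : ans1.length = ans.length := by simp [hans1]
    have h1 : (s + 1) + xs.length ≤ ans1.length := by
      rw [hlen1]; omega
    obtain ⟨ihl, ihg⟩ := ih (s + 1) ans1 h1
    rw [hc]
    refine ⟨by rw [ihl, hlen1], fun i => ?_⟩
    rw [ihg i]
    have hslen : s < ans.length := by omega
    by_cases hi : i = s
    · subst hi
      rw [if_neg (by omega), if_pos (by simp only [List.length_cons]; omega)]
      rw [hans1, getD_set, if_pos ⟨rfl, hslen⟩]
      simp
    · by_cases hrange : s + 1 ≤ i ∧ i < (s + 1) + xs.length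
      · rw [if_pos hrange, if_pos (by simp only [List.length_cons]; omega)]
        rw [hans1, getD_set, if_neg (by omega)]
        have hsub : i - s = (i - (s + 1)) + 1 := by omega
        rw [hsub, List.getD_cons_succ]
      · rw [if_neg hrange, if_neg (by simp only [List.length_cons]; omega)]
        rw [hans1, getD_set, if_neg (by omega)]

theorem adj_getD (key val : String → String) (S : List String)
    (d0 : PySem.Dict String (List String)) (u : String) :
    (S.foldl (fun d i => d.modify (key i) [] (fun l => l ++ [val i])) d0).getD u []
      = d0.getD u [] ++ ((S.filter (fun i => key i == u)).map val) := by
  have hmap : (S.map (fun i => (key i, val i))).foldl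
        (fun (d : PySem.Dict String (List String)) p => d.modify p.1 [] (· ++ [p.2])) d0
      = S.foldl (fun (d : PySem.Dict String (List String)) i => d.modify (key i) [] (fun l => l ++ [val i])) d0 :=
    List.foldl_map
  rw [← hmap, PySem.Dict.getD_foldl_modify_append]
  congr 1
  rw [List.filter_map]
  simp [Function.comp_def]

-- B's bucket dict and A's intermediate dictionaries, named for the proof
def targetsD (report : List String) : PySem.Dict String (List String) :=
  (PySem.Set.ofList report).foldl
    (fun d r =>
      let ws := PySem.Str.split₀ r
      d.modify (ws.getD 1 "") [] (fun l => l ++ [ws.getD 0 ""]))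
    PySem.Dict.empty

def adjD (id_list report : List String) : PySem.Dict String (List String) :=
  (PySem.Set.ofList report).foldl
    (fun d i =>
      let ws := PySem.Str.split₀ i
      d.modify (ws.getD 0 "") [] (fun l => l ++ [ws.getD 1 ""]))
    (id_list.foldl (fun d u => d.insert u []) PySem.Dict.empty)

def cntA (report : List String) : PySem.Dict String Int :=
  PySem.Dict.counter ((PySem.Set.ofList report).map (fun u => (PySem.Str.split₀ u).getD 1 ""))

-- the tally loop over the bucket list, characterised pointwise
theorem tally_fold (k : Int) :
    ∀ (V : List (List String)) (d : PySem.Dict String Int) (u : String),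
      (V.foldl (fun d reporters =>
          if (reporters.length : Int) ≥ k then
            reporters.foldl (fun d rep => d.modify rep 0 (· + 1)) d
          else d) d).getD u 0
        = d.getD u 0
          + (V.map (fun v => if (v.length : Int) ≥ k then (v.count u : Int) else 0)).sum := by
  intro V
  induction V with
  | nil => intro d u; simp
  | cons v V ih =>
    intro d u
    simp only [List.foldl_cons, List.map_cons, List.sum_cons]
    by_cases hv : (v.length : Int) ≥ k
    · rw [if_pos hv, ih, if_pos hv, PySem.Dict.getD_foldl_modify_add_one]
      ring
    · rw [if_neg hv, ih, if_neg hv]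
      ring

theorem sum_map_ite_eq (a : String) (c : Int) :
    ∀ (K : List String), K.Nodup → a ∈ K →
      (K.map (fun x => if x = a then c else 0)).sum = c := by
  intro K
  induction K with
  | nil => intro _ h; cases h
  | cons y K ih =>
    intro hnd hmem
    simp only [List.map_cons, List.sum_cons]
    rcases List.mem_cons.mp hmem with rfl | hmem'
    · rw [if_pos rfl]
      have : ∀ x ∈ K, (if x = a then c else 0) = 0 := by
        intro x hx
        rw [if_neg]
        rintro rfl
        exact (List.nodup_cons.mp hnd).1 hx
      rw [List.sum_eq_zero (fun z hz => by
        obtain ⟨x, hx, rfl⟩ := List.mem_map.mp hz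
        exact this x hx)]
      ring
    · rw [if_neg (by rintro rfl; exact (List.nodup_cons.mp hnd).1 hmem')]
      rw [ih (List.nodup_cons.mp hnd).2 hmem']
      ring

-- summing the per-bucket contributions over the distinct keys = one count over the flat list
theorem sum_groups (Q P : String → Bool) :
    ∀ (S : List String) (K : List String), K.Nodup → (∀ r ∈ S, w1 r ∈ K) →
      (K.map (fun x => if Q x then (S.countP (fun r => (w1 r == x) && P r) : Int) else 0)).sum
        = (S.countP (fun r => Q (w1 r) && P r) : Int) := by
  intro S
  induction S with
  | nil => intro K _ _; simp
  | cons r S ih =>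
    intro K hnd hcov
    have hmem : w1 r ∈ K := hcov r (by simp)
    have hcov' : ∀ x ∈ S, w1 x ∈ K := fun x hx => hcov x (by simp [hx])
    simp only [List.countP_cons]
    have hsplit : ∀ x : String,
        (if Q x then ((S.countP (fun r' => (w1 r' == x) && P r') + if (w1 r == x) && P r then 1 else 0 : Nat) : Int) else 0)
          = (if Q x then (S.countP (fun r' => (w1 r' == x) && P r') : Int) else 0)
            + (if x = w1 r then (if Q (w1 r) && P r then 1 else 0) else 0) := by
      intro x
      by_cases hq : Q x
      · rw [if_pos hq]
        by_cases hx : x = w1 r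
        · subst hx
          rw [if_pos rfl, if_pos hq, hq]
          simp only [beq_self_eq_true, Bool.true_and, Bool.true_and]
          by_cases hp : P r
          · simp [hp]
          · simp [hp]
        · rw [if_neg hx, if_pos hq]
          rw [show ((w1 r == x) && P r) = false by simp [Ne.symm hx]]
          simp
      · rw [if_neg hq, if_neg hq]
        by_cases hx : x = w1 r
        · subst hx; simp [hq]
        · simp [hx]
    have hmapeq : K.map (fun x => if Q x then ((S.countP (fun r' => (w1 r' == x) && P r') + if (w1 r == x) && P r then 1 else 0 : Nat) : Int) else 0)
        = K.map (fun x => (if Q x then (S.countP (fun r' => (w1 r' == x) && P r') : Int) else 0)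
            + (if x = w1 r then (if Q (w1 r) && P r then 1 else 0) else 0)) :=
      List.map_congr_left (fun x _ => hsplit x)
    calc (K.map (fun x => if Q x then ((S.countP (fun r' => (w1 r' == x) && P r') + if (w1 r == x) && P r then 1 else 0 : Nat) : Int) else 0)).sum
        = (K.map (fun x => if Q x then (S.countP (fun r' => (w1 r' == x) && P r') : Int) else 0)).sum
          + (K.map (fun x => if x = w1 r then (if Q (w1 r) && P r then 1 else 0) else 0)).sum := by
          rw [hmapeq, ← List.sum_map_add]
      _ = (S.countP (fun r' => Q (w1 r') && P r') : Int) + (if Q (w1 r) && P r then 1 else 0) := by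
          rw [ih K hnd hcov', sum_map_ite_eq _ _ K hnd hmem]
      _ = _ := by
          by_cases h : Q (w1 r) && P r <;> simp [h]

theorem solution_eq_loopA (id_list report : List String) (k : Int) :
    solution id_list report k
      = loopA (fun u => (adjD id_list report).getD u [])
          (fun r => (cntA report).getD r 0 ≥ k) id_list ((0 : Nat) : Int)
          ((List.range id_list.length).map (fun _ => 0)) := rfl

theorem ports_eq (id_list report : List String) (k : Int) :
    solution id_list report k = solution_alt id_list report k := by
  set S := PySem.Set.ofList report with hS
  -- the common ban count
  have hcnt : ∀ x, (cntA report).getD x 0 = ((S.map w1).count x : Int) := by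
    intro x
    have h1 : cntA report = PySem.Dict.counter (S.map w1) := rfl
    rw [h1, PySem.Dict.getD_counter]
  -- A's adjacency lists
  have hadj : ∀ u, (adjD id_list report).getD u []
      = ((S.filter (fun r => w0 r == u)).map w1) := by
    intro u
    have h1 : adjD id_list report
        = S.foldl (fun d i => d.modify (w0 i) [] (fun l => l ++ [w1 i]))
            (id_list.foldl (fun d u => d.insert u []) PySem.Dict.empty) := rfl
    rw [h1, adj_getD w0 w1]
    rw [getD_foldl_insert_const id_list ([] : List String) u PySem.Dict.empty (fun x => by simp)]
    simp
  -- B's buckets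
  have htgt : ∀ x, (targetsD report).getD x []
      = ((S.filter (fun r => w1 r == x)).map w0) := by
    intro x
    have h1 : targetsD report
        = S.foldl (fun d r => d.modify (w1 r) [] (fun l => l ++ [w0 r])) PySem.Dict.empty := rfl
    rw [h1, adj_getD w1 w0]
    simp
  have hkeys : (targetsD report).keys = PySem.Set.ofList (S.map w1) := by
    have h1 : targetsD report
        = S.foldl (fun d r => d.modify (w1 r) [] (fun l => l ++ [w0 r])) PySem.Dict.empty := rfl
    rw [h1, PySem.Dict.keys_foldl_modify_key]
    rfl
  have hnd : (targetsD report).keys.Nodup := by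
    rw [hkeys]; exact PySem.Set.nodup_ofList _
  have hvals : (targetsD report).values
      = (targetsD report).keys.map (fun x => (targetsD report).getD x []) :=
    PySem.Dict.values_eq_map_keys _ hnd []
  -- B's tally, pointwise
  have htally : ∀ u, ∀ d : PySem.Dict String Int, (∀ x, d.getD x 0 = 0) →
      ((targetsD report).values.foldl (fun d reporters =>
          if (reporters.length : Int) ≥ k then
            reporters.foldl (fun d rep => d.modify rep 0 (· + 1)) d
          else d) d).getD u 0
        = (S.countP (fun r => (((S.map w1).count (w1 r) : Int) ≥ k) && (w0 r == u)) : Int) := by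
    intro u d hd
    rw [tally_fold, hd u, zero_add, hvals, List.map_map]
    have hlen : ∀ x, (((targetsD report).getD x []).length : Int) = ((S.map w1).count x : Int) := by
      intro x
      rw [htgt, List.length_map, List.countP_eq_length_filter.symm, List.count_eq_countP, List.countP_map]
      simp [Function.comp_def]
    have hcount : ∀ x, (((targetsD report).getD x []).count u : Int)
        = (S.countP (fun r => (w1 r == x) && (w0 r == u)) : Int) := by
      intro x
      rw [htgt, List.count_eq_countP, List.countP_map, List.countP_filter]
      congr 1
      apply List.countP_congr
      intro r _
      simp [Function.comp, Bool.and_comm]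
    have hmap : ((targetsD report).keys.map
          (fun x => if (((targetsD report).getD x []).length : Int) ≥ k
            then ((((targetsD report).getD x []).count u : Nat) : Int) else 0))
        = ((targetsD report).keys.map
          (fun x => if (decide (((S.map w1).count x : Int) ≥ k) : Bool) = true
            then (S.countP (fun r => (w1 r == x) && (w0 r == u)) : Int) else 0)) := by
      apply List.map_congr_left
      intro x _
      rw [hlen x]
      by_cases h : ((S.map w1).count x : Int) ≥ k
      · rw [if_pos h, if_pos (by simpa using h), hcount x]
      · rw [if_neg h, if_neg (by simpa using h)]
    simp only [Function.comp_def]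
    rw [hmap, hkeys]
    rw [sum_groups (fun x => decide (((S.map w1).count x : Int) ≥ k)) (fun r => w0 r == u) S
      (PySem.Set.ofList (S.map w1)) (PySem.Set.nodup_ofList _)
      (fun r hr => by rw [PySem.Set.mem_ofList]; exact List.mem_map_of_mem hr)]
  -- assemble
  have hB : solution_alt id_list report k
      = id_list.map (fun u =>
          (S.countP (fun r => (((S.map w1).count (w1 r) : Int) ≥ k) && (w0 r == u)) : Int)) := by
    have h1 : solution_alt id_list report k
        = id_list.map (fun u =>
            ((targetsD report).values.foldl (fun d reporters =>
              if (reporters.length : Int) ≥ k then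
                reporters.foldl (fun d rep => d.modify rep 0 (· + 1)) d
              else d) (id_list.foldl (fun d u => d.insert u 0) PySem.Dict.empty)).getD u 0) := rfl
    rw [h1]
    apply List.map_congr_left
    intro u _
    exact htally u _ (fun x =>
      getD_foldl_insert_const id_list (0 : Int) x PySem.Dict.empty (fun y => by simp))
  rw [solution_eq_loopA, hB]
  obtain ⟨hlen, hget⟩ := loopA_spec (fun u => (adjD id_list report).getD u [])
      (fun r => (cntA report).getD r 0 ≥ k) id_list 0
      ((List.range id_list.length).map (fun _ => 0)) (by simp)
  apply List.ext_getElem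
  · rw [hlen]; simp
  · intro i h1 h2
    have hi : i < id_list.length := by simpa using h2
    rw [List.getElem_map]
    rw [← List.getD_eq_getElem _ 0 h1, hget i]
    rw [if_pos (by simpa using hi)]
    have hz : ((List.range id_list.length).map (fun _ => (0 : Int))).getD i 0 = 0 := by
      rw [List.getD_eq_getElem _ 0 (by simpa using hi)]
      simp
    have hu : id_list.getD (i - 0) "" = id_list[i] := by
      simpa using List.getD_eq_getElem id_list "" hi
    rw [hz, hu, zero_add, hadj]
    rw [List.countP_map, List.countP_filter]
    congr 1
    apply List.countP_congr
    intro r _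
    simp [hcnt]

-- ===== VERDICT (by name: the statement is the Claim_ definition above) =====
theorem solution_spec : Claim_equal_solution := by
  intro id_list report k _ _
  unfold Spec_solution
  exact ports_eq id_list report k
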